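-- pv_equiv track=rewrite | github.com/dylanling/roman_ttt | board.py | symmetry_group
-- ===== SOURCE A (Python) =====
-- def symmetry_group(state):
--     # Reflections
--     up_down = state[::-1]
--     left_right = tuple(row[::-1] for row in state)
--     diagonal = tuple(zip(*state))
--     antidiagonal = tuple(zip(*tuple(row[::-1] for row in up_down)))
--
--     # Rotations
--     ninety_degrees = tuple(zip(*up_down))
--     one_hundred_eighty_degrees = tuple(zip(*ninety_degrees[::-1]))
--     two_hundred_seventy_degrees = tuple(zip(*one_hundred_eighty_degrees[::-1]))
--
--     symmetries = {
--         state,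
--         up_down,
--         left_right,
--         diagonal,
--         antidiagonal,
--         ninety_degrees,
--         one_hundred_eighty_degrees,
--         two_hundred_seventy_degrees,
--     }
--
--     return sorted(symmetries)[0]
-- ===== SOURCE B (Python) =====
-- def symmetry_group(state):
--     # B selects the lexicographically smallest symmetry by ROW-WISE CANDIDATE
--     # ELIMINATION: it never sorts and never compares two whole boards.  The
--     # candidates are obtained from two generators (quarter-turn and row
--     # reversal) rather than eight bespoke zip/reverse expressions.
--     def rot(b):
--         return tuple(zip(*b[::-1]))
--
--     def flip(b):
--         return tuple(row[::-1] for row in b)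
--
--     r1 = rot(state)
--     r2 = rot(r1)
--     cands = [state, r1, r2, rot(r2),
--              state[::-1], rot(state[::-1]), flip(state), rot(flip(state))]
--
--     # tournament: repeatedly keep only the candidates whose i-th row is minimal;
--     # a candidate that runs out of rows is a prefix of every survivor, hence minimal.
--     i = 0
--     while len(cands) > 1:
--         ended = [c for c in cands if len(c) <= i]
--         if ended:
--             return ended[0]
--         key = min(c[i] for c in cands)
--         cands = [c for c in cands if c[i] == key]
--         i += 1
--     return cands[0]
-- ===== Notes on version B (the rewrite author's own statement) =====
-- stated objective: alternative
-- what changed: B derives the candidate orbit from the two generators (quarter-turn and row reversal) and selects the lexicographically smallest board by a row-wise candidate-elimination tournament -- pruning candidates whose i-th row is not minimal, never sorting and never comparing two whole boards -- instead of A's eight bespoke zip/reverse expressions collected into a set and sorted.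
import Mathlib
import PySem

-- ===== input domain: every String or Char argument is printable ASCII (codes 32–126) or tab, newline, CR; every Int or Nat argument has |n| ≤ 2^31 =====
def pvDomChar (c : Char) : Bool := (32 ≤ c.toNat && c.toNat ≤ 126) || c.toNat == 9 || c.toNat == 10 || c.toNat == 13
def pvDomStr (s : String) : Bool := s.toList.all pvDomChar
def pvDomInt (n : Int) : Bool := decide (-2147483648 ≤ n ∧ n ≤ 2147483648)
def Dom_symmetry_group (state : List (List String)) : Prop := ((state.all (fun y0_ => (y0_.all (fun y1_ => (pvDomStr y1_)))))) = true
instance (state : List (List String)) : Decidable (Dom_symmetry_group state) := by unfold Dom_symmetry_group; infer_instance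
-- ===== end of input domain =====

-- B derives the orbit from two generators and selects the lexicographic minimum by a
-- row-wise candidate-elimination scan instead of A's eight bespoke expressions, set and
-- sort (objective: alternative).


-- ===== PORT A =====
-- hand port of Python's variadic 'tuple(zip(*m))': the columns of m, truncated to the
-- shortest row (zip() with no arguments, i.e. m = [], is empty) — exact.
def pyZipStar (m : List (List String)) : List (List String) :=
  match (m.map List.length).min? with
  | none => []
  | some n => (List.range n).map (fun j => m.map (fun r => r.getD j ""))

def symmetry_group (state : List (List String)) : List (List String) :=
  -- state[::-1] / row[::-1] are List.reverse (PySem.List.slice?_none_none_neg_one)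
  let up_down := state.reverse
  let left_right := state.map List.reverse
  let diagonal := pyZipStar state
  let antidiagonal := pyZipStar (up_down.map List.reverse)
  let ninety_degrees := pyZipStar up_down
  let one_hundred_eighty_degrees := pyZipStar ninety_degrees.reverse
  let two_hundred_seventy_degrees := pyZipStar one_hundred_eighty_degrees.reverse
  let symmetries : PySem.Set (List (List String)) := PySem.Set.ofList
    [state, up_down, left_right, diagonal, antidiagonal,
     ninety_degrees, one_hundred_eighty_degrees, two_hundred_seventy_degrees]
  -- sorted(symmetries)[0]: the set contains state, so Python's [0] cannot raise; headD is never the default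
  (PySem.List.sorted symmetries (fun x => x) false).headD []

-- ===== PORT B =====
def pvRot (b : List (List String)) : List (List String) := pyZipStar b.reverse

def pvFlip (b : List (List String)) : List (List String) := b.map List.reverse

-- bound on the candidates' lengths; only used as pvElim's termination measure
def pvMaxLen (l : List (List (List String))) : Nat := l.foldr (fun c m => max c.length m) 0

theorem pvMaxLen_cons (x : List (List String)) (xs : List (List (List String))) :
    pvMaxLen (x :: xs) = max x.length (pvMaxLen xs) := rfl

theorem pvMaxLen_mem {c : List (List String)} {l : List (List (List String))}
    (h : c ∈ l) : c.length ≤ pvMaxLen l := by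
  induction l with
  | nil => cases h
  | cons x xs ih =>
    rw [pvMaxLen_cons]
    rcases List.mem_cons.1 h with rfl | h
    · omega
    · have := ih h; omega

theorem pvMaxLen_sublist {l1 l2 : List (List (List String))} (h : l1.Sublist l2) :
    pvMaxLen l1 ≤ pvMaxLen l2 := by
  induction h with
  | slnil => simp
  | cons x _ ih => rw [pvMaxLen_cons]; omega
  | cons₂ x _ ih => rw [pvMaxLen_cons, pvMaxLen_cons]; omega

theorem pvMaxLen_unattach_filter_le (l : List (List (List String)))
    (p : {x // x ∈ l} → Bool) :
    pvMaxLen ((l.attach.filter p).unattach) ≤ pvMaxLen l := by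
  refine pvMaxLen_sublist ?_
  have h2 := (List.filter_sublist (l := l.attach) (p := p)).map (Subtype.val)
  rw [List.attach_map_subtype_val] at h2
  rw [show (List.filter p l.attach).unattach = List.map Subtype.val (List.filter p l.attach) from rfl]
  exact h2

-- 'min(c[i] for c in cands)' of B
def pvKey (cands : List (List (List String))) (i : Nat) : List String :=
  let rows := cands.map (fun c => c.getD i [])
  rows.foldl min (rows.headD [])

-- the 'while len(cands) > 1' elimination loop of B
def pvElim (cands : List (List (List String))) (i : Nat) : List (List String) :=
  if h1 : 1 < cands.length then
    if h2 : (cands.filter (fun c => decide (c.length ≤ i))).isEmpty then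
      pvElim (cands.filter (fun c => decide (c.getD i [] = pvKey cands i))) (i + 1)
    else (cands.filter (fun c => decide (c.length ≤ i))).headD []
  else cands.headD []
termination_by pvMaxLen cands + 1 - i
decreasing_by
  have hne : cands ≠ [] := by intro h; simp [h] at h1
  obtain ⟨c, cs, rfl⟩ := List.exists_cons_of_ne_nil hne
  simp only [List.isEmpty_iff, List.filter_eq_nil_iff] at h2
  have hc : ¬ ((c.length ≤ i : Prop)) := by
    have := h2 c (List.mem_cons_self ..)
    simpa using this
  have h3 : c.length ≤ pvMaxLen (c :: cs) := pvMaxLen_mem (List.mem_cons_self ..)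
  have key : ∀ (X M : Nat), X ≤ M → i < M → X + 1 - (i + 1) < M + 1 - i := by omega
  exact key _ _ (pvMaxLen_unattach_filter_le _ _) (by omega)

def symmetry_group_alt (state : List (List String)) : List (List String) :=
  let r1 := pvRot state
  let r2 := pvRot r1
  let cands := [state, r1, r2, pvRot r2,
                state.reverse, pvRot state.reverse, pvFlip state, pvRot (pvFlip state)]
  pvElim cands 0

-- ===== PRECONDITION & SPEC =====
def Spec_symmetry_group (state : List (List String)) (out : List (List String)) : Prop := out = symmetry_group_alt state
instance (state : List (List String)) (out : List (List String)) : Decidable (Spec_symmetry_group state out) := by unfold Spec_symmetry_group; infer_instance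

-- ===== CLAIM (what is proved, stated in full; the proofs are below) =====
def Claim_equal_symmetry_group : Prop := ∀ (state : List (List String)), Dom_symmetry_group state → Spec_symmetry_group state (symmetry_group state)

-- ===== LEMMAS AND PROOFS =====

theorem pvMaxLen_filter_le (p : List (List String) → Bool) (l : List (List (List String))) :
    pvMaxLen (l.filter p) ≤ pvMaxLen l := by
  induction l with
  | nil => simp
  | cons x xs ih =>
    rw [List.filter_cons]
    by_cases h : p x <;> simp [h, pvMaxLen_cons] <;> omega

-- the head of sorted(set(x :: xs)) is the minimum of x :: xs
theorem sorted_set_head_min {α : Type} [LinearOrder α] [DecidableEq α] [BEq α] [LawfulBEq α]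
    (d x : α) (xs : List α) :
    (PySem.List.sorted (PySem.Set.ofList (x :: xs)) (fun y => y) false).headD d = xs.foldl min x := by
  have hne : PySem.Set.ofList (x :: xs) ≠ [] := by
    intro h
    have : x ∈ PySem.Set.ofList (x :: xs) := (PySem.Set.mem_ofList _ _).2 (List.mem_cons_self ..)
    simp [h] at this
  have hsne : PySem.List.sorted (PySem.Set.ofList (x :: xs)) (fun y => y) false ≠ [] := by
    intro h
    exact hne ((PySem.List.sorted_eq_nil_iff _ _ _).1 h)
  obtain ⟨m, t, hmt⟩ := List.exists_cons_of_ne_nil hsne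
  have hle : ∀ y ∈ PySem.Set.ofList (x :: xs), m ≤ y := by
    have h := PySem.List.key_head_sorted_le _ (fun y => y) hmt
    simpa using h
  have hmem : m ∈ x :: xs := by
    have : m ∈ PySem.List.sorted (PySem.Set.ofList (x :: xs)) (fun y => y) false := by
      simp [hmt]
    exact (PySem.Set.mem_ofList _ _).1 ((PySem.List.mem_sorted _ _ _ _).1 this)
  have hf : PySem.List.min? (x :: xs) (fun y => y) = some (xs.foldl min x) :=
    PySem.List.min?_id_cons ..
  have hfmem : xs.foldl min x ∈ x :: xs := PySem.List.min?_mem hf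
  have hfle : ∀ y ∈ x :: xs, xs.foldl min x ≤ y := PySem.List.min?_isMin hf
  rw [hmt]
  exact le_antisymm
    (hle _ ((PySem.Set.mem_ofList _ _).2 hfmem))
    (hfle _ hmem)

-- generic facts about 'foldl min'
theorem pvFoldlMin_le_init {α : Type} [LinearOrder α] (l : List α) (a : α) :
    l.foldl min a ≤ a := by
  induction l generalizing a with
  | nil => simp
  | cons x xs ih => exact le_trans (ih (min a x)) (min_le_left ..)

theorem pvFoldlMin_le_mem {α : Type} [LinearOrder α] {l : List α} {x : α} (a : α)
    (h : x ∈ l) : l.foldl min a ≤ x := by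
  induction l generalizing a with
  | nil => cases h
  | cons y ys ih =>
    rcases List.mem_cons.1 h with rfl | h
    · exact le_trans (pvFoldlMin_le_init ys (min a x)) (min_le_right ..)
    · exact ih (min a y) h

theorem pvFoldlMin_mem {α : Type} [LinearOrder α] (l : List α) (a : α) :
    l.foldl min a = a ∨ l.foldl min a ∈ l := by
  induction l generalizing a with
  | nil => simp
  | cons x xs ih =>
    rcases ih (min a x) with h | h
    · rcases min_cases a x with ⟨h', _⟩ | ⟨h', _⟩ <;> rw [List.foldl_cons, h, h']
      · exact Or.inl rfl
      · exact Or.inr (List.mem_cons_self ..)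
    · exact Or.inr (List.mem_cons_of_mem _ h)

theorem pvFoldlMin_eq {α : Type} [LinearOrder α] {l : List α} {a m : α}
    (hm : m = a ∨ m ∈ l) (ha : m ≤ a) (hl : ∀ x ∈ l, m ≤ x) : l.foldl min a = m := by
  refine le_antisymm ?_ ?_
  · rcases hm with rfl | hm
    · exact pvFoldlMin_le_init ..
    · exact pvFoldlMin_le_mem _ hm
  · rcases pvFoldlMin_mem l a with h | h
    · exact ha.trans_eq h.symm
    · exact hl _ h

-- the minimum B's loop computes, as a fold
def pvMinList (l : List (List (List String))) : List (List String) :=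
  l.foldl min (l.headD [])

theorem pvMinList_eq {l : List (List (List String))} {e : List (List String)}
    (he : e ∈ l) (hle : ∀ d ∈ l, e ≤ d) : pvMinList l = e := by
  obtain ⟨x, xs, rfl⟩ := List.exists_cons_of_ne_nil (List.ne_nil_of_mem he)
  show (x :: xs).foldl min x = e
  rw [List.foldl_cons, min_self]
  rcases List.mem_cons.1 he with rfl | he'
  · exact pvFoldlMin_eq (Or.inl rfl) le_rfl (fun d hd => hle d (List.mem_cons_of_mem _ hd))
  · exact pvFoldlMin_eq (Or.inr he') (hle _ (List.mem_cons_self ..))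
      (fun d hd => hle d (List.mem_cons_of_mem _ hd))

theorem pvMinList_mem {l : List (List (List String))} (h : l ≠ []) : pvMinList l ∈ l := by
  obtain ⟨x, xs, rfl⟩ := List.exists_cons_of_ne_nil h
  show (x :: xs).foldl min x ∈ x :: xs
  rw [List.foldl_cons, min_self]
  rcases pvFoldlMin_mem xs x with h | h
  · rw [h]; exact List.mem_cons_self ..
  · exact List.mem_cons_of_mem _ h

theorem pvMinList_le {l : List (List (List String))} {d : List (List String)}
    (h : d ∈ l) : pvMinList l ≤ d := by
  obtain ⟨x, xs, rfl⟩ := List.exists_cons_of_ne_nil (List.ne_nil_of_mem h)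
  show (x :: xs).foldl min x ≤ d
  rw [List.foldl_cons, min_self]
  rcases List.mem_cons.1 h with rfl | h
  · exact pvFoldlMin_le_init ..
  · exact pvFoldlMin_le_mem _ h

-- lexicographic order facts (the instance's < is List.Lex (· < ·))
theorem pv_prefix_le {α : Type} [LinearOrder α] (p t : List α) : p ≤ p ++ t := by
  rcases t with _ | ⟨x, xs⟩
  · simp
  · refine le_of_lt ?_
    show List.Lex (· < ·) p (p ++ x :: xs)
    induction p with
    | nil => exact List.Lex.nil
    | cons a p ih => exact List.Lex.cons ih

theorem pv_lt_mid {α : Type} [LinearOrder α] (p u v : List α) {a b : α} (h : a < b) :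
    p ++ a :: u < p ++ b :: v := by
  show List.Lex (· < ·) _ _
  exact List.Lex.append_left _ (List.Lex.rel h) p

-- boards equal on their first i rows compare by row i
theorem pv_lt_of_row_lt {e d : List (List String)} {i : Nat}
    (hpre : e.take i = d.take i) (he : i < e.length) (hd : i < d.length)
    (h : e.getD i [] < d.getD i []) : e < d := by
  conv_lhs => rw [← List.take_append_drop i e]
  conv_rhs => rw [← List.take_append_drop i d]
  rw [List.drop_eq_getElem_cons he, List.drop_eq_getElem_cons hd, hpre]
  refine pv_lt_mid _ _ _ ?_
  rwa [List.getD_eq_getElem e [] he, List.getD_eq_getElem d [] hd] at h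

-- the key is a row of the list, and below every row
theorem pvKey_mem {l : List (List (List String))} (i : Nat) (hne : l ≠ []) :
    pvKey l i ∈ l.map (fun c => c.getD i []) := by
  obtain ⟨x, xs, rfl⟩ := List.exists_cons_of_ne_nil hne
  show ((x.getD i []) :: xs.map (fun c => c.getD i [])).foldl min (x.getD i []) ∈ _
  rw [List.foldl_cons, min_self]
  rcases pvFoldlMin_mem (xs.map (fun c => c.getD i [])) (x.getD i []) with h | h
  · rw [h]; exact List.mem_cons_self ..
  · exact List.mem_cons_of_mem _ h

theorem pvKey_le {l : List (List (List String))} {c : List (List String)} (i : Nat)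
    (hc : c ∈ l) : pvKey l i ≤ c.getD i [] := by
  obtain ⟨x, xs, rfl⟩ := List.exists_cons_of_ne_nil (List.ne_nil_of_mem hc)
  show ((x.getD i []) :: xs.map (fun c => c.getD i [])).foldl min (x.getD i []) ≤ _
  rw [List.foldl_cons, min_self]
  rcases List.mem_cons.1 hc with rfl | h
  · exact pvFoldlMin_le_init ..
  · exact pvFoldlMin_le_mem _ (List.mem_map_of_mem h)

-- terminal branch: a single candidate
theorem pvElim_single {l : List (List (List String))} (i : Nat)
    (h1 : ¬ 1 < l.length) (hne : l ≠ []) : pvElim l i = pvMinList l := by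
  obtain ⟨x, xs, rfl⟩ := List.exists_cons_of_ne_nil hne
  have hxs : xs = [] := by
    cases xs with
    | nil => rfl
    | cons y ys => simp at h1
  subst hxs
  unfold pvElim
  simp [pvMinList]

-- terminal branch: some candidate has run out of rows; it is a prefix of every
-- candidate, hence the minimum
theorem pvElim_ended {l : List (List (List String))} {i : Nat}
    (h1 : 1 < l.length)
    (h2 : (l.filter (fun c => decide (c.length ≤ i))).isEmpty = false)
    (hpre : ∀ c ∈ l, ∀ d ∈ l, c.take i = d.take i) :
    pvElim l i = pvMinList l := by
  unfold pvElim
  rw [dif_pos h1, dif_neg (by simp [h2])]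
  have hfne : l.filter (fun c => decide (c.length ≤ i)) ≠ [] := by
    intro h; rw [h] at h2; simp at h2
  obtain ⟨e, es, heq⟩ := List.exists_cons_of_ne_nil hfne
  have hemem : e ∈ l.filter (fun c => decide (c.length ≤ i)) := by
    rw [heq]; exact List.mem_cons_self ..
  have hel : e ∈ l := (List.mem_filter.1 hemem).1
  have helen : e.length ≤ i := by
    have := (List.mem_filter.1 hemem).2; simpa using this
  rw [heq]
  show e = pvMinList l
  refine (pvMinList_eq hel ?_).symm
  intro d hd
  have h3 : e.take i = e := List.take_of_length_le helen
  have h4 : e = d.take i := by rw [← h3]; exact hpre e hel d hd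
  calc e = d.take i := h4
    _ ≤ d.take i ++ d.drop i := pv_prefix_le ..
    _ = d := List.take_append_drop ..

-- main invariant: on a nonempty candidate list whose members agree on their first
-- i rows, the elimination loop returns the lexicographic minimum
theorem pvElim_eq_aux (n : Nat) : ∀ (l : List (List (List String))) (i : Nat),
    pvMaxLen l + 1 - i ≤ n → l ≠ [] →
    (∀ c ∈ l, ∀ d ∈ l, c.take i = d.take i) →
    pvElim l i = pvMinList l := by
  induction n with
  | zero =>
    intro l i hn hne hpre
    by_cases h1 : 1 < l.length
    · refine pvElim_ended h1 ?_ hpre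
      rcases h2 : (l.filter (fun c => decide (c.length ≤ i))).isEmpty with _ | _
      · exact h2
      · exfalso
        simp only [List.isEmpty_iff, List.filter_eq_nil_iff] at h2
        obtain ⟨x, xs, rfl⟩ := List.exists_cons_of_ne_nil hne
        have hx : ¬ (x.length ≤ i) := by
          have := h2 x (List.mem_cons_self ..); simpa using this
        have := pvMaxLen_mem (l := x :: xs) (List.mem_cons_self ..)
        omega
    · exact pvElim_single i h1 hne
  | succ n ih =>
    intro l i hn hne hpre
    by_cases h1 : 1 < l.length
    · by_cases h2 : (l.filter (fun c => decide (c.length ≤ i))).isEmpty = true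
      · -- elimination step
        have hall : ∀ c ∈ l, i < c.length := by
          simp only [List.isEmpty_iff, List.filter_eq_nil_iff] at h2
          intro c hc
          have := h2 c hc; simp at this; omega
        unfold pvElim
        rw [dif_pos h1, dif_pos h2]
        set surv := l.filter (fun c => decide (c.getD i [] = pvKey l i)) with hsurv
        -- the key is attained, so survivors exist
        have hsne : surv ≠ [] := by
          have := pvKey_mem i hne
          obtain ⟨c, hc, hck⟩ := List.mem_map.1 this
          intro h
          have : c ∈ surv := List.mem_filter.2 ⟨hc, decide_eq_true hck⟩
          rw [h] at this; cases this
        have hsub : ∀ c ∈ surv, c ∈ l := fun c hc => (List.mem_filter.1 hc).1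
        have hrow : ∀ c ∈ surv, c.getD i [] = pvKey l i := by
          intro c hc
          exact of_decide_eq_true (List.mem_filter.1 hc).2
        -- survivors still agree on their first i+1 rows
        have hpre' : ∀ x ∈ surv, ∀ y ∈ surv, x.take (i + 1) = y.take (i + 1) := by
          intro x hx y hy
          have hxl := hsub x hx
          have hyl := hsub y hy
          rw [List.take_add_one, List.take_add_one,
            List.getElem?_eq_getElem (hall x hxl), List.getElem?_eq_getElem (hall y hyl),
            hpre x hxl y hyl]
          have h5 : x[i]'(hall x hxl) = y[i]'(hall y hyl) := by
            rw [← List.getD_eq_getElem x [] (hall x hxl),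
              ← List.getD_eq_getElem y [] (hall y hyl),
              hrow x hx, hrow y hy]
          rw [h5]
        -- the measure decreases
        have hm1 : pvMaxLen surv ≤ pvMaxLen l := pvMaxLen_filter_le ..
        have hm2 : i < pvMaxLen l := by
          obtain ⟨x, xs, rfl⟩ := List.exists_cons_of_ne_nil hne
          have := hall x (List.mem_cons_self ..)
          have := pvMaxLen_mem (l := x :: xs) (List.mem_cons_self ..)
          omega
        rw [ih surv (i + 1) (by omega) hsne hpre']
        -- the survivors' minimum is the whole list's minimum
        have hmem : pvMinList surv ∈ l := hsub _ (pvMinList_mem hsne)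
        refine (pvMinList_eq hmem ?_).symm
        intro d hd
        by_cases hdk : d.getD i [] = pvKey l i
        · exact pvMinList_le (l := surv)
            (show d ∈ surv from List.mem_filter.2 ⟨hd, decide_eq_true hdk⟩)
        · have hklt : pvKey l i < d.getD i [] :=
            lt_of_le_of_ne (pvKey_le i hd) (fun h => hdk h.symm)
          have hes : pvMinList surv ∈ surv := pvMinList_mem hsne
          refine le_of_lt (pv_lt_of_row_lt (hpre _ hmem d hd) (hall _ hmem) (hall d hd) ?_)
          rw [hrow _ hes]
          exact hklt
      · exact pvElim_ended h1 (by simpa using h2) hpre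
    · exact pvElim_single i h1 hne

theorem pvElim_eq (l : List (List (List String))) (hne : l ≠ []) :
    pvElim l 0 = pvMinList l :=
  pvElim_eq_aux (pvMaxLen l + 1) l 0 (by omega) hne (by simp)

-- ===== VERDICT (by name: the statement is the Claim_ definition above) =====
theorem symmetry_group_spec : Claim_equal_symmetry_group := by
  intro state _
  show symmetry_group state = symmetry_group_alt state
  have hA : symmetry_group state =
      [state.reverse, state.map List.reverse, pyZipStar state,
       pyZipStar (state.reverse.map List.reverse), pyZipStar state.reverse,
       pyZipStar (pyZipStar state.reverse).reverse,
       pyZipStar (pyZipStar (pyZipStar state.reverse).reverse).reverse].foldl min state := by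
    show (PySem.List.sorted (PySem.Set.ofList (state ::
        [state.reverse, state.map List.reverse, pyZipStar state,
         pyZipStar (state.reverse.map List.reverse), pyZipStar state.reverse,
         pyZipStar (pyZipStar state.reverse).reverse,
         pyZipStar (pyZipStar (pyZipStar state.reverse).reverse).reverse]))
        (fun y => y) false).headD [] = _
    have h := sorted_set_head_min (α := List (List String)) []
      state
      [state.reverse, state.map List.reverse, pyZipStar state,
       pyZipStar (state.reverse.map List.reverse), pyZipStar state.reverse,
       pyZipStar (pyZipStar state.reverse).reverse,
       pyZipStar (pyZipStar (pyZipStar state.reverse).reverse).reverse]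
    convert h using 3
  have hB : symmetry_group_alt state =
      pvMinList [state, pvRot state, pvRot (pvRot state), pvRot (pvRot (pvRot state)),
                 state.reverse, pvRot state.reverse, pvFlip state, pvRot (pvFlip state)] :=
    pvElim_eq _ (by simp)
  rw [hA, hB]
  show _ = List.foldl min _ _
  simp only [List.headD, List.foldl, pvRot, pvFlip, min_self,
    List.reverse_reverse, List.map_reverse]
  simp [min_comm, min_left_comm]
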